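-- pv_equiv track=rewrite | github.com/vyrjana/DearEIS | src/deareis/gui/palettes/base.py | get_consecutive_letter_indices
-- ===== SOURCE A (Python) =====
-- from typing import (
--     Any,
--     Dict,
--     List,
--     Optional,
--     Tuple,
-- )
--
-- def get_consecutive_letter_indices(
--
--     source: str,
--     target: str,
-- ) -> List[int]:
--     indices: List[int] = []
--     letter: str
--     for letter in source:
--         index: int = -1
--         if not indices or indices[-1] >= 0:
--             index = target.find(letter, indices[-1] if indices else 0)
--         indices.append(index)
--     return indices
-- ===== SOURCE B (Python) =====
-- def get_consecutive_letter_indices(source, target):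
--     # index every target position by letter once, then walk source with a
--     # monotone cursor per letter (prev never decreases, so cursors only advance)
--     pos = {}
--     for i, ch in enumerate(target):
--         pos.setdefault(ch, []).append(i)
--     ptr = {}
--     indices = []
--     prev = 0
--     for n, ch in enumerate(source):
--         lst = pos.get(ch)
--         if lst is None:
--             return indices + [-1] * (len(source) - n)
--         j = ptr.get(ch, 0)
--         while j < len(lst) and lst[j] < prev:
--             j += 1
--         if j == len(lst):
--             return indices + [-1] * (len(source) - n)
--         ptr[ch] = j
--         prev = lst[j]
--         indices.append(prev)
--     return indices
-- ===== Notes on version B (the rewrite author's own statement) =====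
-- stated objective: alternative
-- what changed: B precomputes a per-letter list of target positions in one pass and walks source with a monotone cursor per letter, instead of A's repeated target.find(letter, prev) scans with a trailing -1 state.
import Mathlib
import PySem

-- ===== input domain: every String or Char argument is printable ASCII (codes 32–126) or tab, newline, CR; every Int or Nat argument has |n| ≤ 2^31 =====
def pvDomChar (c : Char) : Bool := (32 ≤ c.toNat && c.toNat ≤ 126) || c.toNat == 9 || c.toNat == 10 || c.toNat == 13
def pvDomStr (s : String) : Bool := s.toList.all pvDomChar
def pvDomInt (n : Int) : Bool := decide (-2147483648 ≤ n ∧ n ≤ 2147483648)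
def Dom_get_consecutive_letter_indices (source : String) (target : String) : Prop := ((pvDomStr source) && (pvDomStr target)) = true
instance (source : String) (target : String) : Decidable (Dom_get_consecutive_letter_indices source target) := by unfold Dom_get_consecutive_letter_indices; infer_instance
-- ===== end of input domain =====

-- B is an alternative exact algorithm (one-pass per-letter position index + monotone
-- per-letter cursors) instead of A's repeated target.find(letter, prev) with trailing -1 state.

-- ===== PORT A =====
def get_consecutive_letter_indices (source : String) (target : String) : List Int :=
  source.toList.foldl
    (fun indices letter =>
      let index : Int :=
        match indices.getLast? with
        | none => PySem.Str.findFrom target (String.ofList [letter]) 0 none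
        | some last =>
          if 0 ≤ last then PySem.Str.findFrom target (String.ofList [letter]) last none
          else -1
      indices ++ [index])
    []

-- ===== PORT B =====
-- Source B: for i, ch in enumerate(target): pos.setdefault(ch, []).append(i)
def pvBuildPos (target : List Char) : PySem.Dict Char (List Int) :=
  (PySem.List.enumerate target).foldl
    (fun d p => d.modify p.2 [] (· ++ [p.1])) PySem.Dict.empty

-- Source B: while j < len(lst) and lst[j] < prev: j += 1
def pvSkip (lst : List Int) (prev : Int) (j : Nat) : Nat :=
  if h : j < lst.length then
    if lst[j] < prev then pvSkip lst prev (j + 1) else j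
  else j
termination_by lst.length - j

-- Source B: the loop over source with the cursor dict ptr and the last match prev
def pvLoop (pos : PySem.Dict Char (List Int)) :
    List Char → PySem.Dict Char Nat → Int → List Int
  | [], _, _ => []
  | ch :: rest, ptr, prev =>
    match pos.get? ch with
    | none => List.replicate (rest.length + 1) (-1)
    | some lst =>
      let j := pvSkip lst prev (ptr.getD ch 0)
      if h : j < lst.length then
        lst[j] :: pvLoop pos rest (ptr.insert ch j) lst[j]
      else List.replicate (rest.length + 1) (-1)

def get_consecutive_letter_indices_alt (source : String) (target : String) : List Int :=
  pvLoop (pvBuildPos target.toList) source.toList PySem.Dict.empty 0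

-- ===== PRECONDITION & SPEC =====
def Spec_get_consecutive_letter_indices (source : String) (target : String) (out : List Int) : Prop := out = get_consecutive_letter_indices_alt source target
instance (source : String) (target : String) (out : List Int) : Decidable (Spec_get_consecutive_letter_indices source target out) := by unfold Spec_get_consecutive_letter_indices; infer_instance

-- ===== CLAIM (what is proved, stated in full; the proofs are below) =====
def Claim_equal_get_consecutive_letter_indices : Prop := ∀ (source : String) (target : String), Dom_get_consecutive_letter_indices source target → Spec_get_consecutive_letter_indices source target (get_consecutive_letter_indices source target)

-- ===== LEMMAS AND PROOFS =====

-- the positions of letter c in t, in increasing order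
def posSpec (t : List Char) (c : Char) : List Int :=
  ((PySem.List.enumerate t).filter (fun p => p.2 == c)).map (·.1)

-- the first element ≥ k, or -1
def firstGe (lst : List Int) (k : Int) : Int := (lst.find? (fun p => k ≤ p)).getD (-1)

-- reference recursion both ports are reduced to
def aRef (t : List Char) : List Char → Nat → List Int
  | [], _ => []
  | c :: cs, prev =>
    let i := firstGe (posSpec t c) prev
    if i < 0 then List.replicate (cs.length + 1) (-1)
    else i :: aRef t cs i.toNat

lemma mem_posSpec {t : List Char} {c : Char} {x : Int} :
    x ∈ posSpec t c ↔ ∃ (k : Nat) (h : k < t.length), x = k ∧ t[k] = c := by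
  simp [posSpec, List.mem_filter, PySem.List.mem_enumerate_iff]

lemma pairwise_posSpec (t : List Char) (c : Char) : (posSpec t c).Pairwise (· < ·) := by
  unfold posSpec
  refine List.Pairwise.map _ ?_ (List.Pairwise.filter _ (PySem.List.pairwise_lt_enumerate t 0))
  exact fun a b h => h

lemma occ_prefix_iff (t : List Char) (c : Char) (i : Nat) :
    [c] <+: t.drop i ↔ t[i]? = some c := by
  rw [← List.head?_drop]
  cases h : t.drop i with
  | nil => simp
  | cons a l => simp [List.cons_prefix_cons, eq_comm]

lemma get?_buildPos (t : List Char) (c : Char) :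
    (pvBuildPos t).get? c = if c ∈ t then some (posSpec t c) else none := by
  unfold pvBuildPos
  have hswap : (PySem.List.enumerate t).foldl (fun d p => d.modify p.2 [] (· ++ [p.1])) PySem.Dict.empty
      = ((PySem.List.enumerate t).map Prod.swap).foldl (fun d q => d.modify q.1 [] (· ++ [q.2])) PySem.Dict.empty := by
    rw [List.foldl_map]; rfl
  have hgetD := PySem.Dict.getD_foldl_modify_append ((PySem.List.enumerate t).map Prod.swap) PySem.Dict.empty c
  have hpos : (((PySem.List.enumerate t).map Prod.swap).filter (fun p => p.1 == c)).map (·.2) = posSpec t c := by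
    simp [List.filter_map, List.map_map, posSpec, Function.comp_def]
  have hkeys : (((PySem.List.enumerate t).map Prod.swap).foldl (fun d q => d.modify q.1 [] (· ++ [q.2])) PySem.Dict.empty).keys
      = PySem.Set.update PySem.Dict.empty.keys (((PySem.List.enumerate t).map Prod.swap).map (·.1)) :=
    PySem.Dict.keys_foldl_modify_key _ _ _ _ _
  rw [hswap]
  set D := ((PySem.List.enumerate t).map Prod.swap).foldl (fun d q => d.modify q.1 [] (· ++ [q.2])) PySem.Dict.empty with hD
  have hmemkeys : c ∈ D.keys ↔ c ∈ t := by
    rw [hkeys]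
    simp [List.map_map, Function.comp_def, PySem.List.map_snd_enumerate]
  by_cases hc : c ∈ t
  · have hcont : D.contains c = true := by
      rw [PySem.Dict.contains_iff_mem_keys]
      exact hmemkeys.mpr hc
    have hsome : (D.get? c).isSome := by rw [← PySem.Dict.contains_eq_isSome_get?, hcont]
    obtain ⟨v, hv⟩ := Option.isSome_iff_exists.mp hsome
    have hveq : D.getD c [] = v := PySem.Dict.getD_of_get?_eq_some _ _ hv
    rw [hv, if_pos hc, ← hpos]
    congr 1
    rw [← hveq, hgetD]
    simp
  · have hcont : D.contains c = false := by
      rw [← Bool.not_eq_true, PySem.Dict.contains_iff_mem_keys]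
      exact fun h => hc (hmemkeys.mp h)
    rw [if_neg hc]
    rw [PySem.Dict.get?_eq_none_iff_contains]
    exact hcont

lemma find?_eq_some_of_sorted {lst : List Int} {p : Int → Bool} {x : Int}
    (hs : lst.Pairwise (· < ·)) (hx : x ∈ lst) (hpx : p x = true)
    (hmin : ∀ y ∈ lst, p y = true → x ≤ y) : lst.find? p = some x := by
  induction lst with
  | nil => simp at hx
  | cons a l ih =>
    by_cases hpa : p a = true
    · have hxa : x ≤ a := hmin a (by simp) hpa
      have : x = a := by
        rcases List.mem_cons.mp hx with h | h
        · exact h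
        · exact absurd (List.rel_of_pairwise_cons hs h) (by omega)
      simp [hpa, this]
    · have hxne : x ≠ a := fun h => hpa (h ▸ hpx)
      have hxl : x ∈ l := by rcases List.mem_cons.mp hx with h | h; exact absurd h hxne; exact h
      rw [List.find?_cons_of_neg (by simpa using hpa)]
      exact ih hs.tail hxl (fun y hy hpy => hmin y (List.mem_cons_of_mem a hy) hpy)

-- target.find(c, k) is the first position of c at or after k, i.e. firstGe of the position list
lemma findChar (t : List Char) (c : Char) (k : Nat) (hk : k ≤ t.length) :
    PySem.Chars.findFrom t [c] (k : Int) none = firstGe (posSpec t c) k := by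
  by_cases hin : [c] <:+: t.drop k
  · have hr : PySem.Chars.findFrom t [c] (k : Int) none ≠ -1 := by
      rw [Ne, PySem.Chars.findFrom_natCast_eq_neg_one_iff t [c] k hk]
      simpa using hin
    obtain ⟨hkr, hpre, hmin⟩ := PySem.Chars.findFrom_natCast_spec t [c] k hk hr
    set r := PySem.Chars.findFrom t [c] (k : Int) none with hrdef
    have hr0 : 0 ≤ r := le_trans (by positivity) hkr
    have hrN : r = (r.toNat : Int) := by omega
    have hocc : t[r.toNat]? = some c := (occ_prefix_iff t c r.toNat).mp hpre
    have hrlen : r.toNat < t.length := by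
      by_contra h
      rw [List.getElem?_eq_none (by omega)] at hocc
      simp at hocc
    have hmem : r ∈ posSpec t c := by
      rw [mem_posSpec]
      exact ⟨r.toNat, hrlen, hrN, by simpa [List.getElem?_eq_getElem hrlen] using hocc⟩
    have hfind : (posSpec t c).find? (fun p => (k : Int) ≤ p) = some r := by
      apply find?_eq_some_of_sorted (pairwise_posSpec t c) hmem (by simpa using hkr)
      intro y hy hpy
      rw [mem_posSpec] at hy
      obtain ⟨j, hj, rfl, hjc⟩ := hy
      by_contra h
      have hkj : k ≤ j := by simpa using hpy
      exact hmin j (by omega) (by omega) ((occ_prefix_iff t c j).mpr (by simp [List.getElem?_eq_getElem hj, hjc]))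
    simp [firstGe, hfind]
  · have hr : PySem.Chars.findFrom t [c] (k : Int) none = -1 := by
      rw [PySem.Chars.findFrom_natCast_eq_neg_one_iff t [c] k hk]
      simpa using hin
    have hfind : (posSpec t c).find? (fun p => (k : Int) ≤ p) = none := by
      rw [List.find?_eq_none]
      intro x hx hpx
      rw [mem_posSpec] at hx
      obtain ⟨j, hj, rfl, hjc⟩ := hx
      have hkj : k ≤ j := by exact_mod_cast of_decide_eq_true hpx
      apply hin
      have hpref : [c] <+: t.drop j := (occ_prefix_iff t c j).mpr (by simp [List.getElem?_eq_getElem hj, hjc])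
      have h1 : [c] <+: (t.drop k).drop (j - k) := by
        rw [List.drop_drop]
        have hjk : k + (j - k) = j := by omega
        rw [hjk]
        exact hpref
      exact h1.isInfix.trans (List.drop_suffix _ _).isInfix
    simp [firstGe, hfind, hr]

lemma firstGe_neg_eq {lst : List Int} {k : Int} (hk : 0 ≤ k) (h : firstGe lst k < 0) :
    firstGe lst k = -1 := by
  unfold firstGe at *
  cases hf : lst.find? (fun p => k ≤ p) with
  | none => simp
  | some x =>
    have := List.find?_some hf
    rw [hf] at h
    simp at this h
    omega

lemma firstGe_mem {lst : List Int} {k : Int} (h : ¬ firstGe lst k < 0) :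
    firstGe lst k ∈ lst ∧ k ≤ firstGe lst k := by
  unfold firstGe at *
  cases hf : lst.find? (fun p => k ≤ p) with
  | none => simp [hf] at h
  | some x =>
    have h1 := List.find?_some hf
    have h2 := List.mem_of_find?_eq_some hf
    simp [hf] at h ⊢
    simp at h1
    exact ⟨h2, h1⟩

-- A: once the last appended index is negative, every further index is -1
lemma dead_fold (target : String) (src : List Char) :
    ∀ (acc : List Int) (l : Int), acc.getLast? = some l → l < 0 →
    src.foldl (fun indices letter =>
      let index : Int :=
        match indices.getLast? with
        | none => PySem.Str.findFrom target (String.ofList [letter]) 0 none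
        | some last =>
          if 0 ≤ last then PySem.Str.findFrom target (String.ofList [letter]) last none
          else -1
      indices ++ [index]) acc = acc ++ List.replicate src.length (-1) := by
  induction src with
  | nil => intro acc l _ _; simp
  | cons c cs ih =>
    intro acc l hl hneg
    rw [List.foldl_cons]
    simp only [hl]
    rw [if_neg (by omega)]
    rw [ih (acc ++ [-1]) (-1) (by simp) (by omega)]
    simp [List.replicate_succ]

lemma main_fold (target : String) (src : List Char) :
    ∀ (acc : List Int) (prev : Nat), prev ≤ target.toList.length →
    ((acc = [] ∧ prev = 0) ∨ acc.getLast? = some (prev : Int)) →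
    src.foldl (fun indices letter =>
      let index : Int :=
        match indices.getLast? with
        | none => PySem.Str.findFrom target (String.ofList [letter]) 0 none
        | some last =>
          if 0 ≤ last then PySem.Str.findFrom target (String.ofList [letter]) last none
          else -1
      indices ++ [index]) acc = acc ++ aRef target.toList src prev := by
  induction src with
  | nil => intro acc prev _ _; simp [aRef]
  | cons c cs ih =>
    intro acc prev hprev hacc
    rw [List.foldl_cons]
    have hidx : (match acc.getLast? with
        | none => PySem.Str.findFrom target (String.ofList [c]) 0 none
        | some last =>
          if 0 ≤ last then PySem.Str.findFrom target (String.ofList [c]) last none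
          else -1) = firstGe (posSpec target.toList c) prev := by
      rcases hacc with ⟨rfl, rfl⟩ | hlast
      · simp only [List.getLast?_nil]
        have := findChar target.toList c 0 (by omega)
        simpa using this
      · simp only [hlast]
        rw [if_pos (by positivity)]
        have := findChar target.toList c prev hprev
        simpa using this
    rw [hidx]
    set i := firstGe (posSpec target.toList c) prev with hi
    by_cases hneg : i < 0
    · have hm1 : i = -1 := firstGe_neg_eq (by positivity) hneg
      rw [dead_fold target cs (acc ++ [i]) i (by simp) hneg]
      rw [aRef]
      simp only [← hi]
      rw [if_pos hneg]
      simp [hm1, List.replicate_succ]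
    · obtain ⟨hmem, hge⟩ := firstGe_mem (hi ▸ hneg)
      have h0 : 0 ≤ i := le_trans (by positivity) hge
      obtain ⟨j, hj, hji, hjc⟩ := mem_posSpec.mp hmem
      have hiN : (i.toNat : Int) = i := by omega
      have hlen : i.toNat ≤ target.toList.length := by omega
      rw [ih (acc ++ [i]) i.toNat hlen (Or.inr (by simp [hiN]))]
      rw [aRef]
      simp only [← hi]
      rw [if_neg hneg]
      simp

lemma posSpec_nil_of_not_mem {t : List Char} {c : Char} (h : c ∉ t) : posSpec t c = [] := by
  rw [List.eq_nil_iff_forall_not_mem]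
  intro x hx
  obtain ⟨k, hk, _, hkc⟩ := mem_posSpec.mp hx
  exact h (hkc ▸ List.getElem_mem hk)

-- B: the cursor skip lands on the first position satisfying prev ≤ ·
lemma skip_eq (lst : List Int) (prev : Int) (j : Nat) (hj : j ≤ lst.length)
    (hlow : ∀ i, i < j → (hi : i < lst.length) → lst[i] < prev) :
    pvSkip lst prev j = lst.findIdx (fun x => prev ≤ x) := by
  rw [pvSkip]
  by_cases h : j < lst.length
  · rw [dif_pos h]
    by_cases hlt : lst[j] < prev
    · rw [if_pos hlt]
      exact skip_eq lst prev (j+1) (by omega)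
        (fun i hij hi => by rcases Nat.lt_succ_iff_lt_or_eq.mp hij with h' | h'
                            · exact hlow i h' hi
                            · subst h'; exact hlt)
    · rw [if_neg hlt]
      symm
      rw [List.findIdx_eq h]
      refine ⟨by simpa using hlt, fun i hij => by simpa using hlow i hij (by omega)⟩
  · rw [dif_neg h]
    have hje : j = lst.length := by omega
    subst hje
    have hle := List.findIdx_le_length (p := fun x => prev ≤ x) (xs := lst)
    have hge : lst.length ≤ lst.findIdx (fun x => prev ≤ x) := by
      by_contra hlt2
      rw [not_le] at hlt2
      have h1 := List.findIdx_getElem (w := hlt2)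
      have h2 := hlow _ hlt2 hlt2
      simp at h1
      omega
    omega
termination_by lst.length - j

lemma loop_eq (t : List Char) (src : List Char) :
    ∀ (ptr : PySem.Dict Char Nat) (prevN : Nat), prevN ≤ t.length →
    (∀ c, ptr.getD c 0 ≤ (posSpec t c).length ∧
      (∀ i, i < ptr.getD c 0 → (hi : i < (posSpec t c).length) → (posSpec t c)[i] < (prevN : Int))) →
    pvLoop (pvBuildPos t) src ptr (prevN : Int) = aRef t src prevN := by
  induction src with
  | nil => intro ptr prevN _ _; rfl
  | cons ch rest ih =>
    intro ptr prevN hprev hinv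
    rw [pvLoop, get?_buildPos]
    by_cases hc : ch ∈ t
    · rw [if_pos hc]
      simp only
      obtain ⟨hlen, hbefore⟩ := hinv ch
      have hskip : pvSkip (posSpec t ch) (prevN : Int) (ptr.getD ch 0)
          = (posSpec t ch).findIdx (fun x => (prevN : Int) ≤ x) := skip_eq _ _ _ hlen hbefore
      set lst := posSpec t ch with hlst
      set J := lst.findIdx (fun x => (prevN : Int) ≤ x) with hJ
      rw [hskip]
      by_cases hJlt : J < lst.length
      · rw [dif_pos hJlt]
        have hfind : lst.find? (fun x => (prevN : Int) ≤ x) = some lst[J] := by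
          rw [List.find?_eq_getElem?_findIdx, ← hJ, List.getElem?_eq_getElem hJlt]
        have hp : (prevN : Int) ≤ lst[J] := by
          have := List.findIdx_getElem (w := hJlt)
          simpa [← hJ] using this
        have hJmem : lst[J] ∈ lst := List.getElem_mem hJlt
        obtain ⟨k, hk, hkeq, -⟩ := mem_posSpec.mp hJmem
        rw [aRef]
        simp only [← hlst, firstGe, hfind, Option.getD_some]
        rw [if_neg (by omega)]
        congr 1
        have htn : ((lst[J].toNat : Nat) : Int) = lst[J] := by omega
        have hrec := ih (ptr.insert ch J) lst[J].toNat (by omega) ?_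
        · rw [htn] at hrec
          exact hrec
        intro c
        rw [PySem.Dict.getD_insert]
        by_cases hcc : c = ch
        · subst hcc
          rw [if_pos rfl]
          simp only [← hlst]
          refine ⟨by omega, fun i hij hi => ?_⟩
          have hni := List.not_of_lt_findIdx (p := fun x => (prevN : Int) ≤ x) (hJ ▸ hij)
          simp at hni
          omega
        · rw [if_neg hcc]
          obtain ⟨h1, h2⟩ := hinv c
          exact ⟨h1, fun i hij hi => lt_of_lt_of_le (h2 i hij hi) (by omega)⟩
      · rw [dif_neg hJlt]
        have hJe : J = lst.length := le_antisymm (hJ ▸ List.findIdx_le_length) (not_lt.mp hJlt)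
        have hfind : lst.find? (fun x => (prevN : Int) ≤ x) = none := by
          rw [List.find?_eq_getElem?_findIdx, ← hJ, hJe, List.getElem?_eq_none (le_refl _)]
        rw [aRef]
        simp only [← hlst, firstGe, hfind, Option.getD_none]
        rw [if_pos (by omega)]
    · rw [if_neg hc]
      rw [aRef]
      have hnil : posSpec t ch = [] := posSpec_nil_of_not_mem hc
      simp only [hnil, firstGe, List.find?_nil, Option.getD_none]
      rw [if_pos (by omega)]

theorem a_eq_aRef (source target : String) :
    get_consecutive_letter_indices source target = aRef target.toList source.toList 0 := by
  unfold get_consecutive_letter_indices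
  have := main_fold target source.toList [] 0 (by omega) (Or.inl ⟨rfl, rfl⟩)
  simpa using this

theorem b_eq_aRef (source target : String) :
    get_consecutive_letter_indices_alt source target = aRef target.toList source.toList 0 := by
  unfold get_consecutive_letter_indices_alt
  have := loop_eq target.toList source.toList PySem.Dict.empty 0 (by omega)
    (fun c => by simp [PySem.Dict.getD_empty])
  simpa using this

-- ===== VERDICT (by name: the statement is the Claim_ definition above) =====
theorem get_consecutive_letter_indices_spec : Claim_equal_get_consecutive_letter_indices := by
  intro source target _
  unfold Spec_get_consecutive_letter_indices
  rw [a_eq_aRef, b_eq_aRef]
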